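-- pv_equiv track=rewrite | github.com/posl/comment_recommendation | script/split_gen/1_time/en/214_B/4.py | get_num_of_triples
-- ===== SOURCE A (Python) =====
-- def get_num_of_triples(S,T):
--     count = 0
--     for a in range(0,S+1):
--         for b in range(0,S+1):
--             for c in range(0,S+1):
--                 if a+b+c <= S and a*b*c <= T:
--                     count += 1
--     return count
-- ===== SOURCE B (Python) =====
-- def get_num_of_triples(S, T):
--     # O(S^2): for each (a, b) count the admissible c in closed form.
--     count = 0
--     for a in range(S + 1):
--         for b in range(S + 1):
--             cmax = S - a - b
--             if a * b > 0:
--                 cmax2 = min(cmax, T // (a * b))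
--                 if cmax2 >= 0:
--                     count += cmax2 + 1
--             elif T < 0:
--                 continue
--             elif cmax >= 0:
--                 count += cmax + 1
--     return count
-- ===== Notes on version B (the rewrite author's own statement) =====
-- stated objective: faster
-- what changed: Replaced the innermost loop over c by a closed-form count min(S-a-b, T//(a*b)) per (a,b) pair, turning a triple loop into a double loop (O(S^2) vs O(S^3)); intended as faster, measured 48x at the largest size both finished in a timing run.
import Mathlib
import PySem

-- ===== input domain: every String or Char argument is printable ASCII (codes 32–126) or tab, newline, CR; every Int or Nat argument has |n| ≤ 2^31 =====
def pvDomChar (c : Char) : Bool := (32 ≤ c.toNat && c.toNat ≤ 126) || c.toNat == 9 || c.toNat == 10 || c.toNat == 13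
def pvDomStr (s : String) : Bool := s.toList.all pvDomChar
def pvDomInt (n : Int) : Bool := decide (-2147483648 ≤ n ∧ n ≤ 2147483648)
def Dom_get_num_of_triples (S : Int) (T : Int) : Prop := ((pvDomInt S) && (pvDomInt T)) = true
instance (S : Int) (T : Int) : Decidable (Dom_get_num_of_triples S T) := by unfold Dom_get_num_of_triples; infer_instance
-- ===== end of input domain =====

-- B replaces A's innermost loop over c by a closed-form count per (a, b) (one loop level fewer); intended as faster, measured 48x at the largest size both Pythons finished.

-- ===== PORT A =====
def get_num_of_triples (S : Int) (T : Int) : Int :=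
  (PySem.List.pyRange 0 (S + 1) 1).foldl (fun count a =>
    (PySem.List.pyRange 0 (S + 1) 1).foldl (fun count b =>
      (PySem.List.pyRange 0 (S + 1) 1).foldl (fun count c =>
        if a + b + c ≤ S ∧ a * b * c ≤ T then count + 1 else count) count) count) 0

-- ===== PORT B =====
def get_num_of_triples_alt (S : Int) (T : Int) : Int :=
  (PySem.List.pyRange 0 (S + 1) 1).foldl (fun count a =>
    (PySem.List.pyRange 0 (S + 1) 1).foldl (fun count b =>
      let cmax := S - a - b
      if a * b > 0 then
        let cmax2 := min cmax (PySem.Int.floordiv T (a * b))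
        if 0 ≤ cmax2 then count + cmax2 + 1 else count
      else if T < 0 then count
      else if 0 ≤ cmax then count + cmax + 1 else count) count) 0

-- ===== PRECONDITION & SPEC =====
def Spec_get_num_of_triples (S : Int) (T : Int) (out : Int) : Prop := out = get_num_of_triples_alt S T
instance (S : Int) (T : Int) (out : Int) : Decidable (Spec_get_num_of_triples S T out) := by unfold Spec_get_num_of_triples; infer_instance

-- ===== CLAIM (what is proved, stated in full; the proofs are below) =====
def Claim_equal_get_num_of_triples : Prop := ∀ (S : Int) (T : Int), Dom_get_num_of_triples S T → Spec_get_num_of_triples S T (get_num_of_triples S T)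

-- ===== LEMMAS AND PROOFS =====

-- number of c in range(0, m) with c ≤ L
lemma countP_le_pyRange_nat (m : Nat) (L : Int) :
    ((PySem.List.pyRange 0 (m : Int) 1).countP (fun c => decide (c ≤ L)) : Int)
      = min (m : Int) (max 0 (L + 1)) := by
  induction m with
  | zero =>
    rw [show ((0 : Nat) : Int) = 0 by rfl, PySem.List.pyRange_one_eq_nil le_rfl]
    simp only [List.countP_nil, Nat.cast_zero]; omega
  | succ k ih =>
    rw [show ((k + 1 : Nat) : Int) = (k : Int) + 1 by push_cast; ring,
        PySem.List.pyRange_one_succ_right (by positivity)]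
    rw [List.countP_append]
    by_cases h : (k : Int) ≤ L
    · simp [h]; omega
    · simp [h]; push_cast at ih ⊢; omega

lemma countP_le_pyRange (n L : Int) :
    ((PySem.List.pyRange 0 n 1).countP (fun c => decide (c ≤ L)) : Int)
      = min (max 0 n) (max 0 (L + 1)) := by
  by_cases hn : n ≤ 0
  · rw [PySem.List.pyRange_one_eq_nil hn]; simp only [List.countP_nil, Nat.cast_zero]; omega
  · have h : n = ((n.toNat : Nat) : Int) := by omega
    rw [h, countP_le_pyRange_nat]; omega

-- the inner c-loop of A equals B's closed-form count, for 0 ≤ a, 0 ≤ b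
lemma inner_eq (S T a b : Int) (ha : 0 ≤ a) (hb : 0 ≤ b) (count : Int) :
    (PySem.List.pyRange 0 (S + 1) 1).foldl (fun count c =>
        if a + b + c ≤ S ∧ a * b * c ≤ T then count + 1 else count) count
      = (let cmax := S - a - b
         if a * b > 0 then
           let cmax2 := min cmax (PySem.Int.floordiv T (a * b))
           if 0 ≤ cmax2 then count + cmax2 + 1 else count
         else if T < 0 then count
         else if 0 ≤ cmax then count + cmax + 1 else count) := by
  have hfold := PySem.List.foldl_count_if
      (fun c => decide (a + b + c ≤ S ∧ a * b * c ≤ T))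
      (PySem.List.pyRange 0 (S + 1) 1) count
  simp only [decide_eq_true_eq] at hfold
  rw [hfold]
  by_cases hab : 0 < a * b
  · -- condition on c is c ≤ min (S-a-b) (T // (a*b))
    have hcong : List.countP (fun c => decide (a + b + c ≤ S ∧ a * b * c ≤ T))
          (PySem.List.pyRange 0 (S + 1) 1)
        = List.countP (fun c => decide (c ≤ min (S - a - b) (PySem.Int.floordiv T (a * b))))
          (PySem.List.pyRange 0 (S + 1) 1) := by
      apply List.countP_congr
      intro c _
      simp only [decide_eq_true_eq, le_min_iff,
        (PySem.Int.le_floordiv_iff_mul_le hab : c ≤ PySem.Int.floordiv T (a * b) ↔ c * (a * b) ≤ T)]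
      constructor
      · rintro ⟨h1, h2⟩; exact ⟨by omega, by rw [mul_comm]; linarith [h2]⟩
      · rintro ⟨h1, h2⟩; exact ⟨by omega, by rw [show a * b * c = c * (a * b) by ring]; exact h2⟩
    rw [hcong, countP_le_pyRange]
    have h1 : min (S - a - b) (PySem.Int.floordiv T (a * b)) ≤ S - a - b := min_le_left _ _
    simp only [hab, if_pos]
    omega
  · have hab0 : a * b = 0 := by nlinarith [mul_nonneg ha hb]
    by_cases hT : T < 0
    · have : List.countP (fun c => decide (a + b + c ≤ S ∧ a * b * c ≤ T))
          (PySem.List.pyRange 0 (S + 1) 1) = 0 := by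
        apply List.countP_eq_zero.mpr
        intro c _
        simp only [decide_eq_true_eq, not_and]
        intro _
        rw [hab0]; omega
      rw [this]
      simp [hab, hT]
    · have hcong : List.countP (fun c => decide (a + b + c ≤ S ∧ a * b * c ≤ T))
            (PySem.List.pyRange 0 (S + 1) 1)
          = List.countP (fun c => decide (c ≤ S - a - b)) (PySem.List.pyRange 0 (S + 1) 1) := by
        apply List.countP_congr
        intro c _
        simp only [decide_eq_true_eq]
        rw [hab0]
        constructor
        · rintro ⟨h1, _⟩; omega
        · intro h1; exact ⟨by omega, by omega⟩
      rw [hcong, countP_le_pyRange]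
      simp only [hab, hT, if_false]
      split_ifs <;> omega

-- ===== VERDICT (by name: the statement is the Claim_ definition above) =====
theorem get_num_of_triples_spec : Claim_equal_get_num_of_triples := by
  intro S T _
  unfold Spec_get_num_of_triples get_num_of_triples get_num_of_triples_alt
  apply PySem.List.foldl_congr_mem
  intro count a hamem
  have ha : 0 ≤ a := (PySem.List.mem_pyRange_one.mp hamem).1
  apply PySem.List.foldl_congr_mem
  intro count b hbmem
  have hb : 0 ≤ b := (PySem.List.mem_pyRange_one.mp hbmem).1
  exact inner_eq S T a b ha hb count
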